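-- pv_equiv track=rewrite | github.com/ZachLegros/B8ZS-Encoding | B8ZS.py | B8ZS_decode
-- ===== SOURCE A (Python) =====
-- def B8ZS_decode(msg):
--     patterns = ['-+0+-', '+-0-+']
--     result = ""
--     i = 0
--     while(i < len(msg)):
--         if msg[i:i+5] in patterns:
--             result = result + '00000'
--             i = i + 5
--         else:
--             bit = msg[i]
--             result = result + ('1' if bit != '0' else '0')
--             i = i + 1
--     return result
-- ===== SOURCE B (Python) =====
-- import re
--
-- def B8ZS_decode(msg):
--     substituted = re.sub(r'\-\+0\+\-|\+\-0\-\+', '00000', msg)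
--     return ''.join('0' if c == '0' else '1' for c in substituted)
-- ===== Notes on version B (the rewrite author's own statement) =====
-- stated objective: faster
-- what changed: Replaces the manual index-stepping while loop with quadratic string concatenation by a single regex substitution of the two B8ZS patterns followed by a join over a character-mapping pass.
import Mathlib
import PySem

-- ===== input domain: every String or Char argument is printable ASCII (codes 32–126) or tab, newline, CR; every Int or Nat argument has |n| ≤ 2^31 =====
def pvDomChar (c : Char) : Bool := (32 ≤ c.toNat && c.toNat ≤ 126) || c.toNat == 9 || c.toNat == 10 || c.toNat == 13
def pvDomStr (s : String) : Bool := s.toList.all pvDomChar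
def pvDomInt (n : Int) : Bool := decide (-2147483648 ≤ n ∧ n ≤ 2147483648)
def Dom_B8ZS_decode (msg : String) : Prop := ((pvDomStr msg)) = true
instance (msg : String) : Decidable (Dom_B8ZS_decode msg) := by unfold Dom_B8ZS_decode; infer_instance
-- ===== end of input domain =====

-- B replaces A's manual index-stepping while loop by one regex-substitution pass of the
-- two patterns followed by a join over a per-character mapping pass, avoiding A's quadratic string concatenation.

-- ===== PORT A =====
-- A's patterns = ['-+0+-', '+-0-+']; msg[i:i+5] is the 5-char window (shorter near the end),
-- so we recurse over the remaining suffix of msg, acc is A's growing `result` string.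
def pvPat1 : List Char := ['-', '+', '0', '+', '-']
def pvPat2 : List Char := ['+', '-', '0', '-', '+']

def pvAGo : List Char → List Char → List Char
  | [], acc => acc
  | c :: rest, acc =>
    if (c :: rest).take 5 = pvPat1 ∨ (c :: rest).take 5 = pvPat2 then
      pvAGo ((c :: rest).drop 5) (acc ++ ['0', '0', '0', '0', '0'])
    else
      pvAGo rest (acc ++ [if c ≠ '0' then '1' else '0'])
termination_by cs _ => cs.length
decreasing_by
  · simp [List.length_drop]
  · simp

def B8ZS_decode (msg : String) : String := String.ofList (pvAGo msg.toList [])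

-- ===== PORT B =====
-- B's re.sub: the regex engine scans left-to-right, at each position trying the two
-- alternatives, replacing a match by '00000' and continuing after it; ported step for step.
def pvSubst : List Char → List Char
  | [] => []
  | c :: rest =>
    if (c :: rest).take 5 = pvPat1 ∨ (c :: rest).take 5 = pvPat2 then
      '0' :: '0' :: '0' :: '0' :: '0' :: pvSubst ((c :: rest).drop 5)
    else
      c :: pvSubst rest
termination_by cs => cs.length
decreasing_by
  · simp [List.length_drop]
  · simp

-- B's second pass: ''.join('0' if c == '0' else '1' for c in substituted)
def pvMapBit (c : Char) : Char := if c = '0' then '0' else '1'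

def B8ZS_decode_alt (msg : String) : String :=
  String.ofList ((pvSubst msg.toList).map pvMapBit)

-- ===== PRECONDITION & SPEC =====
def Spec_B8ZS_decode (msg : String) (out : String) : Prop := out = B8ZS_decode_alt msg
instance (msg : String) (out : String) : Decidable (Spec_B8ZS_decode msg out) := by unfold Spec_B8ZS_decode; infer_instance

-- ===== CLAIM (what is proved, stated in full; the proofs are below) =====
def Claim_equal_B8ZS_decode : Prop := ∀ (msg : String), Dom_B8ZS_decode msg → Spec_B8ZS_decode msg (B8ZS_decode msg)

-- ===== LEMMAS AND PROOFS =====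
theorem pvAGo_eq (cs acc : List Char) :
    pvAGo cs acc = acc ++ (pvSubst cs).map pvMapBit := by
  induction cs, acc using pvAGo.induct with
  | case1 acc => simp [pvAGo, pvSubst]
  | case2 c rest acc h ih =>
    rw [pvAGo, pvSubst, if_pos h, if_pos h, ih]
    simp [pvMapBit]
  | case3 c rest acc h ih =>
    rw [pvAGo, pvSubst, if_neg h, if_neg h]
    simp only [ne_eq, dite_eq_ite, ite_not] at ih ⊢
    rw [ih]
    by_cases hc : c = '0' <;> simp [pvMapBit, hc]

-- ===== VERDICT (by name: the statement is the Claim_ definition above) =====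
theorem B8ZS_decode_spec : Claim_equal_B8ZS_decode := by
  intro msg _
  unfold Spec_B8ZS_decode B8ZS_decode B8ZS_decode_alt
  rw [pvAGo_eq]
  simp
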